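-- pv_equiv track=rewrite | github.com/jaehoonstudent/1234 | 2020 python/exam5_answer - 복사본.py | exclamation
-- ===== SOURCE A (Python) =====
-- def exclamation(word):
--     new = ""
--     for ch in word:
--         if ch in 'aeiou':
--             new += ch*4
--         else:
--             new += ch
--     return new+'!'
-- ===== SOURCE B (Python) =====
-- def exclamation(word):
--     # staged passes: for each vowel, split the word on it and rejoin with the
--     # quadrupled vowel -- no per-character scan or branch in Python code
--     for v in 'aeiou':
--         word = (v * 4).join(word.split(v))
--     return word + '!'
-- ===== Notes on version B (the rewrite author's own statement) =====
-- stated objective: alternative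
-- what changed: Replaces A's single per-character loop with if/else string accumulation by five staged split/join passes, one per vowel (word.split(v) rejoined with v*4); correct because each pass inserts only copies of its own vowel, which later passes never split on.
import Mathlib
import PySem

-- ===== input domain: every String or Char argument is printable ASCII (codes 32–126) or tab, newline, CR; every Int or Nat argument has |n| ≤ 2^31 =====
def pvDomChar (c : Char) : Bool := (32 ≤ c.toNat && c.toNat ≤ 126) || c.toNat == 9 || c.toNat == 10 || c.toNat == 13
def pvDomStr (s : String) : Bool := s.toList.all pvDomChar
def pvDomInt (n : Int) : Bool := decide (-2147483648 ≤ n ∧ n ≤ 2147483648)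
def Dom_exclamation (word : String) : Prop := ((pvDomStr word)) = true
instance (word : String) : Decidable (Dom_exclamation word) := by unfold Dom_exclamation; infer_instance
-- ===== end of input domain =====

-- B replaces A's per-character loop with five staged split/join passes (one per vowel).

-- ===== PORT A =====
-- literal port of A's loop: accumulate `new`; branch on `ch in 'aeiou'`; `ch*4` is 4 copies
def exclamation (word : String) : String :=
  (word.toList.foldl (fun new ch =>
      if ("aeiou".toList.contains ch) then new ++ String.ofList (List.replicate 4 ch)
      else new ++ String.singleton ch) "") ++ "!"

-- ===== PORT B =====
-- one pass of Source B's loop body: (v*4).join(word.split(v))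
def vowelPass (w : String) (v : Char) : String :=
  String.ofList (PySem.Chars.join (List.replicate 4 v) (PySem.Chars.splitOn w.toList [v]))

-- Source B: for v in 'aeiou': word = (v*4).join(word.split(v)); return word + '!'
def exclamation_alt (word : String) : String :=
  ("aeiou".toList.foldl vowelPass word) ++ "!"

-- ===== PRECONDITION & SPEC =====
def Spec_exclamation (word : String) (out : String) : Prop := out = exclamation_alt word
instance (word : String) (out : String) : Decidable (Spec_exclamation word out) := by unfold Spec_exclamation; infer_instance

-- ===== CLAIM (what is proved, stated in full; the proofs are below) =====
def Claim_equal_exclamation : Prop := ∀ (word : String), Dom_exclamation word → Spec_exclamation word (exclamation word)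

-- ===== LEMMAS AND PROOFS =====

-- structural model of Python's single-character split
def splitV (v : Char) : List Char → List (List Char)
  | [] => [[]]
  | c :: rest =>
      if c = v then [] :: splitV v rest
      else match splitV v rest with
           | [] => [[c]]
           | h :: t => (c :: h) :: t

lemma splitV_ne_nil (v : Char) (l : List Char) : splitV v l ≠ [] := by
  induction l with
  | nil => simp [splitV]
  | cons c rest ih =>
      by_cases h : c = v
      · simp [splitV, h]
      · simp only [splitV, if_neg h]
        cases splitV v rest <;> simp

-- per-character translation after processing the vowels in `vs`
def vtrans (vs : List Char) (c : Char) : List Char :=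
  if vs.contains c then List.replicate 4 c else [c]

lemma go_single (v : Char) (fuel : Nat) :
    ∀ (l cur : List Char) (acc : List (List Char)), l.length ≤ fuel →
      PySem.Chars.splitOn.go [v] fuel l cur acc
        = acc.reverse ++ (match splitV v l with
            | [] => []
            | h :: t => (cur.reverse ++ h) :: t) := by
  induction fuel with
  | zero =>
      intro l cur acc hl
      have : l = [] := List.length_eq_zero_iff.mp (Nat.le_zero.mp hl)
      subst this
      simp [PySem.Chars.splitOn.go, splitV]
  | succ n ih =>
      intro l cur acc hl
      cases l with
      | nil => simp [PySem.Chars.splitOn.go, splitV]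
      | cons c rest =>
          have hlen : rest.length ≤ n := by simpa using hl
          by_cases h : v = c
          · subst h
            have hpre : [v].isPrefixOf (v :: rest) = true := by simp [List.isPrefixOf]
            simp only [PySem.Chars.splitOn.go, hpre, if_pos rfl, List.drop_succ_cons,
              List.drop_zero, List.length_singleton, splitV]
            rw [ih rest [] (cur.reverse :: acc) hlen]
            cases hsp : splitV v rest with
            | nil => exact absurd hsp (splitV_ne_nil v rest)
            | cons h t => simp
          · have hpre : [v].isPrefixOf (c :: rest) = false := by
              simp [List.isPrefixOf, beq_eq_false_iff_ne.mpr h]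
            simp only [PySem.Chars.splitOn.go, hpre, Bool.false_eq_true, if_false]
            rw [ih rest (c :: cur) acc hlen]
            have hcv : ¬ c = v := fun hh => h hh.symm
            simp only [splitV, if_neg hcv]
            cases hsp : splitV v rest with
            | nil => exact absurd hsp (splitV_ne_nil v rest)
            | cons h t => simp

lemma splitOn_single (v : Char) (l : List Char) :
    PySem.Chars.splitOn l [v] = splitV v l := by
  unfold PySem.Chars.splitOn
  rw [go_single v (l.length + 1) l [] [] (Nat.le_succ _)]
  cases hsp : splitV v l with
  | nil => exact absurd hsp (splitV_ne_nil v l)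
  | cons h t => simp

lemma join_splitV (v : Char) (l : List Char) :
    PySem.Chars.join (List.replicate 4 v) (splitV v l)
      = l.flatMap (fun c => if c = v then List.replicate 4 c else [c]) := by
  induction l with
  | nil => simp [splitV, PySem.Chars.join, List.intercalate]
  | cons c rest ih =>
      by_cases h : c = v
      · subst h
        simp only [splitV, if_pos rfl, List.flatMap_cons, ← ih]
        cases hsp : splitV c rest with
        | nil => exact absurd hsp (splitV_ne_nil c rest)
        | cons h t =>
            simp [PySem.Chars.join, List.intercalate, List.intersperse]
      · simp only [splitV, if_neg h, List.flatMap_cons, if_neg h, ← ih]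
        cases hsp : splitV v rest with
        | nil => exact absurd hsp (splitV_ne_nil v rest)
        | cons hd t =>
            cases t with
            | nil => simp [PySem.Chars.join, List.intercalate, List.intersperse]
            | cons hd' t' => simp [PySem.Chars.join, List.intercalate, List.intersperse]

-- one Python pass, characterised as a per-character flatMap
def passC (w : List Char) (v : Char) : List Char :=
  PySem.Chars.join (List.replicate 4 v) (PySem.Chars.splitOn w [v])

lemma passC_eq (w : List Char) (v : Char) :
    passC w v = w.flatMap (fun c => if c = v then List.replicate 4 c else [c]) := by
  rw [passC, splitOn_single, join_splitV]

-- composing the staged passes over a duplicate-free vowel list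
lemma foldl_passC (vowels : List Char) (hnd : vowels.Nodup) (l : List Char) :
    vowels.foldl passC l = l.flatMap (vtrans vowels) := by
  induction vowels generalizing l with
  | nil =>
      have h : vtrans [] = fun c => [c] := by funext c; simp [vtrans]
      simp [h, List.flatMap_singleton']
  | cons v rest ih =>
      have hv : v ∉ rest := (List.nodup_cons.mp hnd).1
      have hrest : rest.Nodup := (List.nodup_cons.mp hnd).2
      rw [List.foldl_cons, ih hrest, passC_eq, List.flatMap_assoc]
      apply List.flatMap_congr
      intro c _
      by_cases h : c = v
      · subst h
        have : (List.replicate 4 c) = [c, c, c, c] := rfl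
        have hcr : vtrans rest c = [c] := by
          simp [vtrans, List.contains_eq_mem, hv]
        simp [vtrans, this, hv]
      · simp only [if_neg h, List.flatMap_cons, List.flatMap_nil, List.append_nil]
        by_cases hm : c ∈ rest
        · have : c ∈ v :: rest := List.mem_cons_of_mem _ hm
          simp [vtrans, List.contains_eq_mem, hm, this]
        · have : c ∉ v :: rest := by simp [h, hm]
          simp [vtrans, List.contains_eq_mem, hm, this]

-- A's loop, characterised by the same flatMap
lemma exclamation_loop (l : List Char) (s : String) :
    (l.foldl (fun new ch =>
      if ("aeiou".toList.contains ch) then new ++ String.ofList (List.replicate 4 ch)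
      else new ++ String.singleton ch) s).toList
      = s.toList ++ l.flatMap (vtrans "aeiou".toList) := by
  induction l generalizing s with
  | nil => simp
  | cons c l ih =>
      rw [List.foldl_cons, ih, List.flatMap_cons, ← List.append_assoc]
      congr 1
      by_cases h : ("aeiou".toList.contains c) = true
      · have hm : c = 'a' ∨ c = 'e' ∨ c = 'i' ∨ c = 'o' ∨ c = 'u' := by simpa using h
        simp [vtrans, hm]
      · have hm : ¬(c = 'a' ∨ c = 'e' ∨ c = 'i' ∨ c = 'o' ∨ c = 'u') := by simpa using h
        simp [vtrans, hm, String.singleton]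

-- B's String-level fold agrees with the list-level fold
lemma foldl_vowelPass (vowels : List Char) (w : String) :
    (vowels.foldl vowelPass w).toList = vowels.foldl passC w.toList := by
  induction vowels generalizing w with
  | nil => rfl
  | cons v rest ih =>
      rw [List.foldl_cons, List.foldl_cons, ih]
      congr 1
      simp [vowelPass, passC]

-- ===== VERDICT (by name: the statement is the Claim_ definition above) =====
theorem exclamation_spec : Claim_equal_exclamation := by
  intro word _
  unfold Spec_exclamation exclamation exclamation_alt
  apply String.toList_inj.mp
  rw [String.toList_append, String.toList_append, exclamation_loop,
      foldl_vowelPass, foldl_passC _ (by decide)]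
  rfl
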